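-- pv_equiv track=rewrite | github.com/0x12th/leetcode-and-others | leetcode-easy/2529.py | maximum_count_log_n
-- ===== SOURCE A (Python) =====
-- def maximum_count_log_n(nums: list[int]) -> int:  # O(log n)
--     def first_index(find_positive):
--         left, right = 0, len(nums)
--         while left < right:
--             mid = (left + right) // 2
--             if find_positive:
--                 if nums[mid] > 0:
--                     right = mid
--                 else:
--                     left = mid + 1
--             else:
--                 if nums[mid] >= 0:
--                     right = mid
--                 else:
--                     left = mid + 1
--         return left
--
--     neg = first_index(False)
--     pos = len(nums) - first_index(True)
--
--     return max(neg, pos)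
-- ===== SOURCE B (Python) =====
-- def maximum_count_log_n(nums: list[int]) -> int:
--     def ipoint(a, ok):
--         # insertion point by recursive descent on sublists
--         if not a:
--             return 0
--         m = len(a) // 2
--         if ok(a[m]):
--             return ipoint(a[:m], ok)
--         return m + 1 + ipoint(a[m + 1:], ok)
--
--     neg = ipoint(nums, lambda x: x >= 0)
--     pos = len(nums) - ipoint(nums, lambda x: x > 0)
--     return max(neg, pos)
-- ===== Notes on version B (the rewrite author's own statement) =====
-- stated objective: alternative
-- what changed: Replaced the iterative two-pointer (left,right) loop with an is-positive flag branched on inside it by a single recursive descent on list slices parameterized by a predicate closure, returning a relative insertion point with an offset accumulated through the recursion.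
import Mathlib
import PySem

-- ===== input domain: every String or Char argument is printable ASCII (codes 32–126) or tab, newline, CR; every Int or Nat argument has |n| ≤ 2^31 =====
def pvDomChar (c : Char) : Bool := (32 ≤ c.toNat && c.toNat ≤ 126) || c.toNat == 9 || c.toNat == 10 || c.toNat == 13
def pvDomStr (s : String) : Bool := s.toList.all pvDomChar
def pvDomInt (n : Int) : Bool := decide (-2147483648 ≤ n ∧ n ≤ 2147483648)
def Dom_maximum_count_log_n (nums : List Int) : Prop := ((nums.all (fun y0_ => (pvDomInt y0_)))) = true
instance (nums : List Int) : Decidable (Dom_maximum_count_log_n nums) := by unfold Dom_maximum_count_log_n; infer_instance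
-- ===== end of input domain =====

-- B replaces A's iterative two-pointer binary-search loop (flag branched inside)
-- by a recursive descent on list slices with predicate closures; it probes the
-- same elements, so the two agree on every input (no precondition needed).


-- ===== PORT A =====
-- A's inner helper `first_index`: `nums[mid]` is always in range inside the loop
-- (0 ≤ left ≤ mid < right ≤ len), so getD's default 0 is unreachable.
def pvFirstIndex (nums : List Int) (findPositive : Bool) (left right : Nat) : Nat :=
  if _h : left < right then
    let mid := (left + right) / 2
    let v := nums.getD mid 0
    if findPositive then
      if v > 0 then pvFirstIndex nums findPositive left mid
      else pvFirstIndex nums findPositive (mid + 1) right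
    else
      if v ≥ 0 then pvFirstIndex nums findPositive left mid
      else pvFirstIndex nums findPositive (mid + 1) right
  else left
termination_by right - left
decreasing_by all_goals omega

def maximum_count_log_n (nums : List Int) : Int :=
  let neg : Int := pvFirstIndex nums false 0 nums.length
  let pos : Int := (nums.length : Int) - pvFirstIndex nums true 0 nums.length
  max neg pos

-- ===== PORT B =====
-- B's helper `ipoint`: `a[m]` is always in range (a nonempty, m = len a / 2),
-- so getD's default 0 is unreachable.
def pvIpoint (a : List Int) (ok : Int → Bool) : Nat :=
  if h : a.isEmpty then 0
  else
    let m := a.length / 2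
    if ok (a.getD m 0) then pvIpoint (a.take m) ok
    else m + 1 + pvIpoint (a.drop (m + 1)) ok
termination_by a.length
decreasing_by
  all_goals
    have hlen : 0 < a.length := List.length_pos_of_ne_nil (by simpa using h)
    simp [List.length_take, List.length_drop]
    omega

def maximum_count_log_n_alt (nums : List Int) : Int :=
  let neg : Int := pvIpoint nums (fun x => decide (x ≥ 0))
  let pos : Int := (nums.length : Int) - pvIpoint nums (fun x => decide (x > 0))
  max neg pos

-- ===== PRECONDITION & SPEC =====
def Spec_maximum_count_log_n (nums : List Int) (out : Int) : Prop := out = maximum_count_log_n_alt nums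
instance (nums : List Int) (out : Int) : Decidable (Spec_maximum_count_log_n nums out) := by unfold Spec_maximum_count_log_n; infer_instance

-- ===== CLAIM (what is proved, stated in full; the proofs are below) =====
def Claim_equal_maximum_count_log_n : Prop := ∀ (nums : List Int), Dom_maximum_count_log_n nums → Spec_maximum_count_log_n nums (maximum_count_log_n nums)

-- ===== LEMMAS AND PROOFS =====

-- the predicate B passes for A's boolean flag
def pvOk (b : Bool) (x : Int) : Bool := if b then decide (x > 0) else decide (x ≥ 0)

-- A's loop on the window [left, right) equals left + B's descent on the slice
-- nums[left:right]: both probe the element at absolute index (left+right)/2.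
lemma pvFirstIndex_eq_ipoint (nums : List Int) (b : Bool) (left right : Nat)
    (h1 : left ≤ right) (h2 : right ≤ nums.length) :
    pvFirstIndex nums b left right
      = left + pvIpoint ((nums.drop left).take (right - left)) (pvOk b) := by
  rw [pvFirstIndex, pvIpoint]
  have hsublen : ((nums.drop left).take (right - left)).length = right - left := by
    simp [List.length_take, List.length_drop]; omega
  by_cases h : left < right
  · have hne : ((nums.drop left).take (right - left)).isEmpty = false := by
      have hx : ((nums.drop left).take (right - left)).length ≠ 0 := by omega
      simp only [ne_eq, List.length_eq_zero_iff] at hx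
      simp [hx]
    rw [dif_pos h, hne]
    simp only [Bool.false_eq_true, dite_false, hsublen]
    have hmid : (left + right) / 2 = left + (right - left) / 2 := by omega
    have hmlt : (right - left) / 2 < ((nums.drop left).take (right - left)).length := by
      rw [hsublen]; omega
    have habs : left + (right - left) / 2 < nums.length := by omega
    have hval : ((nums.drop left).take (right - left)).getD ((right - left) / 2) 0
        = nums.getD ((left + right) / 2) 0 := by
      rw [List.getD_eq_getElem _ _ hmlt, List.getD_eq_getElem _ _ (by omega : (left + right) / 2 < nums.length)]
      rw [List.getElem_take, List.getElem_drop]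
      congr 1
      omega
    -- the two recursive slices match the shrunken windows
    have htake : ((nums.drop left).take (right - left)).take ((right - left) / 2)
        = (nums.drop left).take ((left + right) / 2 - left) := by
      rw [List.take_take]
      congr 1
      omega
    have hdrop : ((nums.drop left).take (right - left)).drop ((right - left) / 2 + 1)
        = (nums.drop ((left + right) / 2 + 1)).take (right - ((left + right) / 2 + 1)) := by
      rw [List.drop_take, List.drop_drop]
      congr 1
      · omega
      · congr 1; omega
    have hrecL := pvFirstIndex_eq_ipoint nums b left ((left + right) / 2) (by omega) (by omega)
    have hrecR := pvFirstIndex_eq_ipoint nums b ((left + right) / 2 + 1) right (by omega) h2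
    cases b with
    | false =>
      by_cases hv : nums.getD ((left + right) / 2) 0 ≥ 0
      · have hok : pvOk false (((nums.drop left).take (right - left)).getD ((right - left) / 2) 0) = true := by
          rw [hval]; exact decide_eq_true hv
        simp only [Bool.false_eq_true, if_false, hok, eq_self_iff_true, if_true, if_pos hv]
        rw [hrecL, htake]
      · have hok : pvOk false (((nums.drop left).take (right - left)).getD ((right - left) / 2) 0) = false := by
          rw [hval]; exact decide_eq_false hv
        simp only [Bool.false_eq_true, if_false, hok, if_neg hv]
        rw [hrecR, hdrop]
        omega
    | true =>
      by_cases hv : nums.getD ((left + right) / 2) 0 > 0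
      · have hok : pvOk true (((nums.drop left).take (right - left)).getD ((right - left) / 2) 0) = true := by
          rw [hval]; exact decide_eq_true hv
        simp only [eq_self_iff_true, if_true, hok, if_pos hv]
        rw [hrecL, htake]
      · have hok : pvOk true (((nums.drop left).take (right - left)).getD ((right - left) / 2) 0) = false := by
          rw [hval]; exact decide_eq_false hv
        simp only [eq_self_iff_true, if_true, hok, Bool.false_eq_true, if_false, if_neg hv]
        rw [hrecR, hdrop]
        omega
  · have hempty : ((nums.drop left).take (right - left)).isEmpty = true := by
      have : ((nums.drop left).take (right - left)).length = 0 := by omega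
      simp only [List.length_eq_zero_iff] at this
      simp [this]
    rw [dif_neg h, hempty]
    simp
termination_by right - left
decreasing_by all_goals omega

-- ===== VERDICT (by name: the statement is the Claim_ definition above) =====
theorem maximum_count_log_n_spec : Claim_equal_maximum_count_log_n := by
  intro nums _
  unfold Spec_maximum_count_log_n maximum_count_log_n maximum_count_log_n_alt
  have hF := pvFirstIndex_eq_ipoint nums false 0 nums.length (Nat.zero_le _) (le_refl _)
  have hT := pvFirstIndex_eq_ipoint nums true 0 nums.length (Nat.zero_le _) (le_refl _)
  simp only [List.drop_zero, Nat.sub_zero, List.take_length, Nat.zero_add] at hF hT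
  rw [hF, hT]
  rfl
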